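-- pv_equiv track=rewrite | github.com/gimboleo/studia_public | semestr 1/python/Lista7/zad4.py | spirala
-- ===== SOURCE A (Python) =====
-- def spirala(a):
--     x = 0
--     b = a
--     rysunek = ''
--     while b != 0:
--         for i in range(b):
--             if x%3 == 0: rysunek = rysunek + 'v'
--             elif x%3 == 1: rysunek = rysunek + 'p'
--             elif x%3 == 2: rysunek = rysunek + 'g'
--             rysunek = rysunek + 'f'
--             x = x + 1
--         rysunek = rysunek + 'l'
--         b = b - 1
--     return rysunek
-- ===== SOURCE B (Python) =====
-- def spirala(a):
--     total = a * (a + 1) // 2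
--     body = ['vpg'[j % 3] + 'f' for j in range(total)]
--     parts = []
--     pos = 0
--     for b in range(a, 0, -1):
--         parts.append(''.join(body[pos:pos + b]))
--         parts.append('l')
--         pos += b
--     return ''.join(parts)
-- ===== Notes on version B (the rewrite author's own statement) =====
-- stated objective: alternative
-- what changed: B first precomputes the full flat list of repeating 'vpg'-cycle plus 'f' units using the closed-form triangular total, then in a separate pass segments that list into consecutive chunks of decreasing block sizes with an 'l' after each, joining at the end, instead of A's single interleaved while/for loop with a global counter and repeated string concatenation.
import Mathlib
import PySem

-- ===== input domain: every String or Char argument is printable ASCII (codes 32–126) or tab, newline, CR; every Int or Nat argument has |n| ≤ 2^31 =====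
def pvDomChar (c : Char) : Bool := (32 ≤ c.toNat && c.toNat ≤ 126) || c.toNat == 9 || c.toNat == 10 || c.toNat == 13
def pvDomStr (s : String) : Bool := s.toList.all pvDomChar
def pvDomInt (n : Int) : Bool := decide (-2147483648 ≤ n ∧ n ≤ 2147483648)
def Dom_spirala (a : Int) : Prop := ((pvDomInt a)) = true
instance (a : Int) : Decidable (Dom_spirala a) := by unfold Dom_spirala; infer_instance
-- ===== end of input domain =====

-- B separates pattern generation (closed-form total, flat unit list) from block segmentation,
-- replacing A's single interleaved counter loop; same cost class (objective: alternative).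
-- Pre_spirala excludes negative a, where A's while loop never terminates.


-- ===== PORT A =====
-- the body of `for i in range(b)`: appends 'vpg' char by x%3, then 'f', increments x
def spiralaFor : Nat → Int → List Char → Int × List Char
  | 0, x, r => (x, r)
  | Nat.succ n, x, r =>
      let r1 := if PySem.Int.mod x 3 = 0 then r ++ ['v']
                else if PySem.Int.mod x 3 = 1 then r ++ ['p']
                else if PySem.Int.mod x 3 = 2 then r ++ ['g']
                else r
      spiralaFor n (x + 1) (r1 ++ ['f'])

-- the `while b != 0` loop, counting b down (a.toNat iterations; diverges in Python for a < 0)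
def spiralaLoop : Nat → Int → List Char → List Char
  | 0, _, r => r
  | Nat.succ b, x, r =>
      let p := spiralaFor (b + 1) x r
      spiralaLoop b p.1 (p.2 ++ ['l'])

def spirala (a : Int) : String := String.ofList (spiralaLoop a.toNat 0 [])

-- ===== PORT B =====
-- one unit of the pattern: 'vpg'[j % 3] + 'f'  (j % 3 ∈ {0,1,2}, so pyGet? never misses)
def spiralaUnit (j : Int) : List Char :=
  ((PySem.Str.pyGet? "vpg" (PySem.Int.mod j 3)).elim [] (fun c => [c])) ++ ['f']

-- segmentation pass: consecutive chunks of sizes b, b-1, …, 1, each followed by 'l'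
def spiralaSeg : List (List Char) → Nat → List Char
  | _, 0 => []
  | body, Nat.succ b => (body.take (b + 1)).flatten ++ ['l'] ++ spiralaSeg (body.drop (b + 1)) b

def spirala_alt (a : Int) : String :=
  let total := PySem.Int.floordiv (a * (a + 1)) 2
  let body := (PySem.List.pyRange 0 total 1).map spiralaUnit
  String.ofList (spiralaSeg body a.toNat)

-- ===== PRECONDITION & SPEC =====
-- Pre_ excludes negative a: there A's while loop decrements b forever and Python diverges.
def Pre_spirala (a : Int) : Prop := 0 ≤ a
instance (a : Int) : Decidable (Pre_spirala a) := by unfold Pre_spirala; infer_instance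
def pvWitness_spirala : Int := (4)

def Spec_spirala (a : Int) (out : String) : Prop := out = spirala_alt a
instance (a : Int) (out : String) : Decidable (Spec_spirala a out) := by unfold Spec_spirala; infer_instance

-- ===== CLAIM (what is proved, stated in full; the proofs are below) =====
def Claim_equal_spirala : Prop := ∀ (a : Int), Dom_spirala a → Pre_spirala a → Spec_spirala a (spirala a)

-- ===== LEMMAS AND PROOFS =====

-- A's unit, as A writes it
def spiralaUnitA (x : Int) : List Char :=
  (if PySem.Int.mod x 3 = 0 then ['v']
   else if PySem.Int.mod x 3 = 1 then ['p']
   else if PySem.Int.mod x 3 = 2 then ['g'] else []) ++ ['f']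

def tri : Nat → Nat
  | 0 => 0
  | Nat.succ b => (b + 1) + tri b

theorem spiralaFor_eq (n : Nat) : ∀ (x : Int) (r : List Char),
    spiralaFor n x r = (x + n, r ++ ((List.range n).map (fun i : Nat => spiralaUnitA (x + (i : Int)))).flatten) := by
  induction n with
  | zero => intro x r; simp [spiralaFor]
  | succ n ih =>
      intro x r
      rw [spiralaFor, ih, Prod.mk.injEq]
      refine ⟨by push_cast; ring, ?_⟩
      have hr : List.range (n + 1) = 0 :: (List.range n).map (· + 1) := by
        simp [List.range_succ_eq_map]
      rw [hr]
      simp only [List.map_cons, List.map_map, List.flatten_cons, Function.comp_def]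
      have harg : (fun i : Nat => spiralaUnitA (x + ((i + 1 : Nat) : Int)))
          = fun i : Nat => spiralaUnitA (x + 1 + (i : Int)) := by
        funext i; congr 1; push_cast; ring
      rw [harg]
      simp only [spiralaUnitA, Nat.cast_zero, add_zero]
      split_ifs <;> simp

theorem spiralaUnit_eq (j : Int) : spiralaUnit j = spiralaUnitA j := by
  have h0 : 0 ≤ PySem.Int.mod j 3 := PySem.Int.mod_nonneg j (by norm_num)
  have h3 : PySem.Int.mod j 3 < 3 := PySem.Int.mod_lt j (by norm_num)
  unfold spiralaUnit spiralaUnitA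
  interval_cases h : PySem.Int.mod j 3 <;> simp

theorem spiralaLoop_eq (b : Nat) : ∀ (x : Int) (r : List Char),
    spiralaLoop b x r = r ++ spiralaSeg ((List.range (tri b)).map (fun i : Nat => spiralaUnitA (x + (i : Int)))) b := by
  induction b with
  | zero => intro x r; simp [spiralaLoop, spiralaSeg]
  | succ b ih =>
      intro x r
      rw [spiralaLoop, spiralaFor_eq]
      dsimp only
      rw [ih, spiralaSeg]
      have hsplit : List.range (tri (b + 1)) = List.range (b + 1) ++ (List.range (tri b)).map ((b + 1) + ·) := by
        rw [tri, List.range_add]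
      rw [hsplit, List.map_append]
      have hlen : ((List.range (b + 1)).map (fun i : Nat => spiralaUnitA (x + (i : Int)))).length = b + 1 := by simp
      rw [List.take_append_of_le_length (by omega), List.drop_append_of_le_length (by omega)]
      have htake : ((List.range (b + 1)).map (fun i : Nat => spiralaUnitA (x + (i : Int)))).take (b + 1)
          = (List.range (b + 1)).map (fun i : Nat => spiralaUnitA (x + (i : Int))) :=
        List.take_of_length_le (by omega)
      have hdrop : ((List.range (b + 1)).map (fun i : Nat => spiralaUnitA (x + (i : Int)))).drop (b + 1)
          = [] :=
        List.drop_eq_nil_of_le (by omega)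
      rw [htake, hdrop, List.nil_append, List.map_map]
      have harg : ((fun i : Nat => spiralaUnitA (x + (i : Int))) ∘ ((b + 1) + ·) : Nat → List Char)
          = fun i : Nat => spiralaUnitA (x + ((b + 1 : Nat) : Int) + (i : Int)) := by
        funext i; simp only [Function.comp]; congr 1; push_cast; ring
      rw [harg]
      simp [List.append_assoc]

theorem tri_closed (n : Nat) : tri n = n * (n + 1) / 2 := by
  induction n with
  | zero => rfl
  | succ n ih =>
      rw [tri, ih]
      obtain ⟨k, hk⟩ := Nat.even_mul_succ_self n
      have h : (n + 1) * (n + 1 + 1) = n * (n + 1) + 2 * (n + 1) := by ring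
      omega

theorem spirala_spec_aux (a : Int) (ha : 0 ≤ a) : spirala a = spirala_alt a := by
  obtain ⟨n, rfl⟩ := Int.eq_ofNat_of_zero_le ha
  unfold spirala spirala_alt
  have htotal : PySem.Int.floordiv ((n : Int) * ((n : Int) + 1)) 2 = ((tri n : Nat) : Int) := by
    have h1 : ((n : Int) * ((n : Int) + 1)) = ((n * (n + 1) : Nat) : Int) := by push_cast; ring
    rw [h1, tri_closed]
    exact_mod_cast PySem.Int.floordiv_natCast (n * (n + 1)) 2
  rw [htotal]
  simp only [Int.toNat_natCast]
  rw [PySem.List.pyRange_one]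
  have h0 : ((tri n : Nat) : Int) - 0 = ((tri n : Nat) : Int) := by ring
  rw [h0, Int.toNat_natCast, List.map_map]
  congr 1
  rw [spiralaLoop_eq]
  simp only [List.nil_append]
  congr 1
  apply List.map_congr_left
  intro i _
  simp only [Function.comp]
  rw [spiralaUnit_eq]

-- ===== VERDICT (by name: the statement is the Claim_ definition above) =====
theorem spirala_spec : Claim_equal_spirala := by
  intro a _ hpre
  exact spirala_spec_aux a hpre
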